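-- pv_equiv track=rewrite | github.com/ruiqixu37/liars-dice-ai | game.py | count_matching_dice
-- ===== SOURCE A (Python) =====
-- def count_matching_dice(dice1, dice2, face, wild_one):
--     """Count total dice matching a face across both players' dice."""
--     total = 0
--     for dice_int in (dice1, dice2):
--         d = dice_int
--         while d > 0:
--             digit = d % 10
--             d //= 10
--             if digit == face:
--                 total += 1
--             elif wild_one and digit == 1 and face != 1:
--                 total += 1
--     return total
-- ===== SOURCE B (Python) =====
-- def count_matching_dice(dice1, dice2, face, wild_one):
--     """Count total dice matching a face across both players' dice.
--
--     Decimal-string formulation: concatenate the digit strings of the two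
--     (positive) dice and count the characters equal to str(face), plus the
--     '1' characters when ones are wild."""
--     s = (str(dice1) if dice1 > 0 else "") + (str(dice2) if dice2 > 0 else "")
--     target = str(face)
--     wild = wild_one and face != 1
--     return sum(1 for c in s if c == target or (wild and c == "1"))
-- ===== Notes on version B (the rewrite author's own statement) =====
-- stated objective: alternative
-- what changed: B abandons A's arithmetic digit-extraction loop entirely: it converts each positive die to its decimal string, concatenates them, and counts the characters equal to str(face) (plus '1' characters when ones are wild) in one comprehension.
import Mathlib
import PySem

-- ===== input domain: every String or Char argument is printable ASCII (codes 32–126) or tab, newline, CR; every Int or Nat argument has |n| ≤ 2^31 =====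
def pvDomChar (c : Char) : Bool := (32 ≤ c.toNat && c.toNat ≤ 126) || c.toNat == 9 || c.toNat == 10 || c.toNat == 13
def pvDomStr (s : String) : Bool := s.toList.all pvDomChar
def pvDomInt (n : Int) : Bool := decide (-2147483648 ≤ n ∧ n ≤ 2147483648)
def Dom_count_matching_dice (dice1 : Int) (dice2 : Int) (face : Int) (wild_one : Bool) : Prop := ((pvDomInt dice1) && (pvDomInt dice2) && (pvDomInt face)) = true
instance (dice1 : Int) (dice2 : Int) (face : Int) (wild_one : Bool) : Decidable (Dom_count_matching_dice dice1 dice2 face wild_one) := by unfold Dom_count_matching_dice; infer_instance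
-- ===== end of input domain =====

-- B recasts A's arithmetic digit-extraction loop as a decimal-string formulation: concatenate str() of the positive dice and count matching characters (alternative structure, same cost).


-- termination helper for A's while-loop: d //= 10 strictly shrinks a positive d
theorem pv_floordiv10_toNat_lt (d : Int) (h : 0 < d) :
    (PySem.Int.floordiv d 10).toNat < d.toNat := by
  rw [PySem.Int.floordiv_eq_ediv_of_pos (by norm_num)]
  omega

-- ===== PORT A =====
-- the inner 'while d > 0' loop of A, carrying 'total'
def aWhile (d : Int) (total : Int) (face : Int) (wild_one : Bool) : Int :=
  if h : 0 < d then
    let digit := PySem.Int.mod d 10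
    let d' := PySem.Int.floordiv d 10
    let total' :=
      if digit == face then total + 1
      else if wild_one && digit == 1 && !(face == 1) then total + 1
      else total
    aWhile d' total' face wild_one
  else total
termination_by d.toNat
decreasing_by exact pv_floordiv10_toNat_lt d h

def count_matching_dice (dice1 : Int) (dice2 : Int) (face : Int) (wild_one : Bool) : Int :=
  [dice1, dice2].foldl (fun total dice_int => aWhile dice_int total face wild_one) 0

-- ===== PORT B =====
-- strings are handled on the List Char side (PySem.Int.toChars = str(n)); 'c == target'
-- compares the one-character string [c] with str(face); sum(1 for …) is the 0/1 sum
def count_matching_dice_alt (dice1 : Int) (dice2 : Int) (face : Int) (wild_one : Bool) : Int :=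
  let s : List Char := (if 0 < dice1 then PySem.Int.toChars dice1 else []) ++
                       (if 0 < dice2 then PySem.Int.toChars dice2 else [])
  let target := PySem.Int.toChars face
  let wild := wild_one && !(face == 1)
  (s.map (fun c => if ([c] == target || (wild && c == '1')) then (1 : Int) else 0)).sum

-- ===== PRECONDITION & SPEC =====
def Spec_count_matching_dice (dice1 : Int) (dice2 : Int) (face : Int) (wild_one : Bool) (out : Int) : Prop := out = count_matching_dice_alt dice1 dice2 face wild_one
instance (dice1 : Int) (dice2 : Int) (face : Int) (wild_one : Bool) (out : Int) : Decidable (Spec_count_matching_dice dice1 dice2 face wild_one out) := by unfold Spec_count_matching_dice; infer_instance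

-- ===== CLAIM (what is proved, stated in full; the proofs are below) =====
def Claim_equal_count_matching_dice : Prop := ∀ (dice1 : Int) (dice2 : Int) (face : Int) (wild_one : Bool), Dom_count_matching_dice dice1 dice2 face wild_one → Spec_count_matching_dice dice1 dice2 face wild_one (count_matching_dice dice1 dice2 face wild_one)

-- ===== LEMMAS AND PROOFS =====

-- the digit stream A's loop consumes, least-significant first (Int side)
def pvDigits (d : Int) : List Int :=
  if h : 0 < d then PySem.Int.mod d 10 :: pvDigits (PySem.Int.floordiv d 10) else []
termination_by d.toNat
decreasing_by exact pv_floordiv10_toNat_lt d h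

-- the same stream on the Nat side
def natDigits (n : Nat) : List Nat :=
  if h : 0 < n then n % 10 :: natDigits (n / 10) else []
termination_by n
decreasing_by exact Nat.div_lt_self h (by norm_num)

theorem aWhile_eq (face : Int) (wild_one : Bool) (d total : Int) :
    aWhile d total face wild_one =
      total + ((pvDigits d).countP
        (fun g => g == face || (wild_one && g == 1 && !(face == 1))) : Int) := by
  rw [aWhile, pvDigits]
  by_cases h : 0 < d
  · simp only [dif_pos h, List.countP_cons]
    rw [aWhile_eq face wild_one (PySem.Int.floordiv d 10)]
    split_ifs <;> simp_all <;> omega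
  · simp [h]
termination_by d.toNat
decreasing_by exact pv_floordiv10_toNat_lt d h

theorem natDigits_lt (n : Nat) : ∀ g ∈ natDigits n, g < 10 := by
  rw [natDigits]
  by_cases h : 0 < n
  · simp only [dif_pos h, List.mem_cons]
    rintro g (rfl | hg)
    · omega
    · exact natDigits_lt (n / 10) g hg
  · simp [h]
termination_by n
decreasing_by exact Nat.div_lt_self h (by norm_num)

theorem pvDigits_eq_natDigits (n : Nat) :
    pvDigits (n : Int) = (natDigits n).map Int.ofNat := by
  rw [pvDigits, natDigits]
  by_cases h : 0 < n
  · rw [dif_pos (by exact_mod_cast h : (0:Int) < (n:Int)), dif_pos h, List.map_cons]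
    have hm : PySem.Int.mod (n : Int) 10 = ((n % 10 : Nat) : Int) := by
      exact_mod_cast PySem.Int.mod_natCast n 10
    have hd : PySem.Int.floordiv (n : Int) 10 = ((n / 10 : Nat) : Int) := by
      exact_mod_cast PySem.Int.floordiv_natCast n 10
    rw [hm, hd, pvDigits_eq_natDigits (n / 10)]
    simp
  · have h0 : n = 0 := by omega
    subst h0; simp
termination_by n
decreasing_by exact Nat.div_lt_self h (by norm_num)

-- Nat.toDigitsCore writes exactly the digits of n, most-significant first
theorem toDigitsCore_eq (f : Nat) : ∀ (n : Nat) (acc : List Char), 0 < n → n < 10 ^ f →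
    Nat.toDigitsCore 10 f n acc = (natDigits n).reverse.map Nat.digitChar ++ acc := by
  induction f with
  | zero => intro n acc hn hf; omega
  | succ f ih =>
    intro n acc hn hf
    rw [natDigits, dif_pos hn]
    simp only [Nat.toDigitsCore, List.reverse_cons, List.map_append, List.map_cons,
      List.map_nil, List.append_assoc, List.cons_append, List.nil_append]
    by_cases h10 : n / 10 = 0
    · have hnil : natDigits (n / 10) = [] := by rw [h10, natDigits]; simp
      rw [if_pos h10, hnil]
      simp
    · rw [if_neg h10, ih (n / 10) _ (by omega) (by omega)]

-- str(d) for a positive d is its decimal digits, most-significant first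
theorem toChars_pos (d : Int) (h : 0 < d) :
    PySem.Int.toChars d = (natDigits d.toNat).reverse.map Nat.digitChar := by
  have hlt : d.toNat < 10 ^ (d.toNat + 1) :=
    lt_of_lt_of_le (Nat.lt_pow_self (by norm_num)) (Nat.pow_le_pow_right (by norm_num) (by omega))
  simp only [PySem.Int.toChars, if_neg (by omega : ¬ d < 0)]
  rw [Nat.toDigits, toDigitsCore_eq (d.toNat + 1) d.toNat [] (by omega) hlt, List.append_nil]

-- character test ↔ digit test, for a single decimal digit g
theorem pred_bridge (g : Nat) (hg : g < 10) (face : Int) (wild_one : Bool) :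
    (([Nat.digitChar g] == PySem.Int.toChars face ||
        ((wild_one && !(face == 1)) && Nat.digitChar g == '1'))) =
      (((g : Int) == face || (wild_one && (g : Int) == 1 && !(face == 1)))) := by
  have h1 : (Nat.digitChar g == '1') = ((g : Int) == 1) := by
    interval_cases g <;> decide
  by_cases hneg : face < 0
  · -- str(face) starts with '-', which no digitChar is
    have hA : ((g : Int) == face) = false := by
      simp only [beq_eq_false_iff_ne, ne_eq]; omega
    have hB : ([Nat.digitChar g] == PySem.Int.toChars face) = false := by
      simp only [beq_eq_false_iff_ne, ne_eq]
      intro hEq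
      have hchars : PySem.Int.toChars face = '-' :: Nat.toDigits 10 face.natAbs := by
        simp [PySem.Int.toChars, hneg]
      rw [hchars] at hEq
      have hdash : Nat.digitChar g = '-' := by injection hEq
      revert hdash; interval_cases g <;> decide
    have hne1 : (face == 1) = false := by simp only [beq_eq_false_iff_ne, ne_eq]; omega
    rw [h1, hA, hB, hne1]
    cases wild_one <;> simp
  · by_cases hbig : 10 ≤ face
    · -- face ≥ 10: str(face) has at least two characters
      have hA : ((g : Int) == face) = false := by
        simp only [beq_eq_false_iff_ne, ne_eq]; omega
      have hB : ([Nat.digitChar g] == PySem.Int.toChars face) = false := by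
        simp only [beq_eq_false_iff_ne, ne_eq]
        intro hEq
        have hft : 10 ≤ face.toNat := by omega
        have h2 : 2 ≤ (natDigits face.toNat).length := by
          rw [natDigits, dif_pos (by omega : 0 < face.toNat)]
          rw [natDigits, dif_pos (by omega : 0 < face.toNat / 10)]
          simp
        have hlen := congrArg List.length hEq
        rw [toChars_pos face (by omega)] at hlen
        simp at hlen
        omega
      have hne1 : (face == 1) = false := by simp only [beq_eq_false_iff_ne, ne_eq]; omega
      rw [h1, hA, hB, hne1]
      cases wild_one <;> simp
    · -- 0 ≤ face ≤ 9: str(face) is the single digit character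
      obtain ⟨m, rfl⟩ : ∃ m : Nat, face = (m : Int) := ⟨face.toNat, by omega⟩
      have hm : m < 10 := by omega
      interval_cases g <;> interval_cases m <;> cases wild_one <;> decide

-- per-die: counting matching characters of str(d) = counting matching digits of A's loop
theorem charCount_eq (d face : Int) (wild_one : Bool) :
    (((if 0 < d then PySem.Int.toChars d else []).countP
        (fun c => [c] == PySem.Int.toChars face || ((wild_one && !(face == 1)) && c == '1'))) : Int) =
      ((pvDigits d).countP (fun g => g == face || (wild_one && g == 1 && !(face == 1))) : Int) := by
  by_cases h : 0 < d
  · have hpd : pvDigits d = (natDigits d.toNat).map Int.ofNat := by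
      conv_lhs => rw [show d = ((d.toNat : Nat) : Int) by omega]
      exact pvDigits_eq_natDigits d.toNat
    rw [if_pos h, toChars_pos d h, hpd, List.countP_map, List.countP_reverse, List.countP_map]
    congr 1
    apply List.countP_congr
    intro g hg
    have hb := pred_bridge g (natDigits_lt d.toNat g hg) face wild_one
    simp only [Function.comp_apply, Int.ofNat_eq_natCast, hb]
  · rw [if_neg h, pvDigits, dif_neg h]
    simp

theorem count_matching_dice_eq (dice1 dice2 face : Int) (wild_one : Bool) :
    count_matching_dice dice1 dice2 face wild_one =
      count_matching_dice_alt dice1 dice2 face wild_one := by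
  unfold count_matching_dice count_matching_dice_alt
  simp only [List.foldl_cons, List.foldl_nil]
  rw [aWhile_eq, aWhile_eq, PySem.List.sum_map_ite_one_zero, List.countP_append]
  push_cast
  rw [charCount_eq dice1 face wild_one, charCount_eq dice2 face wild_one]
  omega

-- ===== VERDICT (by name: the statement is the Claim_ definition above) =====
theorem count_matching_dice_spec : Claim_equal_count_matching_dice := by
  intro dice1 dice2 face wild_one _
  unfold Spec_count_matching_dice
  exact count_matching_dice_eq dice1 dice2 face wild_one
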